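-- pv_equiv track=rewrite | github.com/marcrb88/PRACT_1_Roige_Benaiges_Marc_TC | source/export_dataset.py | build_fieldnames
-- ===== SOURCE A (Python) =====
-- DEFAULT_PRIORITY_FIELDS = ["titol", "url", "estat", "pdfs"]
--
-- def build_fieldnames(rows):
--     seen = set()
--     extra_fields = []
--
--     for row in rows:
--         for key in row.keys():
--             if key not in seen and key not in DEFAULT_PRIORITY_FIELDS:
--                 seen.add(key)
--                 extra_fields.append(key)
--
--     return DEFAULT_PRIORITY_FIELDS + sorted(extra_fields)
-- ===== SOURCE B (Python) =====
-- DEFAULT_PRIORITY_FIELDS = ["titol", "url", "estat", "pdfs"]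
--
--
-- def build_fieldnames(rows):
--     # Sort-then-scan: gather every key (with duplicates), sort once, then a
--     # single linear scan removes duplicates (now adjacent) and priority fields.
--     all_keys = []
--     for row in rows:
--         all_keys.extend(row.keys())
--     all_keys.sort()
--     extras = []
--     for k in all_keys:
--         if k not in DEFAULT_PRIORITY_FIELDS and (not extras or extras[-1] != k):
--             extras.append(k)
--     return DEFAULT_PRIORITY_FIELDS + extras
-- ===== Notes on version B (the rewrite author's own statement) =====
-- stated objective: alternative
-- what changed: B uses no set at all: it collects every key with duplicates, sorts the whole multiset once, and removes duplicates by an adjacent-equality check in one linear scan (sort-then-dedup), whereas A deduplicates incrementally with a seen-set and sorts only the extras.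
import Mathlib
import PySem

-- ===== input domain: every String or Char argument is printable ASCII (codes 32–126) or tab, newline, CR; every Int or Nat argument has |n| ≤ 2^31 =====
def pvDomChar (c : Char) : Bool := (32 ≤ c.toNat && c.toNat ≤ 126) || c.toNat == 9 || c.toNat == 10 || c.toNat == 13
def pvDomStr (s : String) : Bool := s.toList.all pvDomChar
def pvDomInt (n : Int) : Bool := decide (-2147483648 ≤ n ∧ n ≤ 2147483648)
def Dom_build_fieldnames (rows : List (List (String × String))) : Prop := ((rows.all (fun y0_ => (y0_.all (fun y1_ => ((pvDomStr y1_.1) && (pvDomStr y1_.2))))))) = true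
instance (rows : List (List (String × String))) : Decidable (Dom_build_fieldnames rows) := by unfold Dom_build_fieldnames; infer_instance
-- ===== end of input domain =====

-- B gathers all keys with duplicates, sorts the whole multiset once, and removes duplicates
-- by an adjacent-equality check in one linear scan (sort-then-dedup, no set); objective: alternative.


def DEFAULT_PRIORITY_FIELDS : List String := ["titol", "url", "estat", "pdfs"]

-- ===== PORT A =====
-- a row is a Python dict; 'row.keys()' iterates its distinct keys in first-insertion order
def pvRowKeys (row : List (String × String)) : List String :=
  PySem.List.dedup (row.map Prod.fst)

def build_fieldnames (rows : List (List (String × String))) : List String :=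
  let st : PySem.Set String × List String :=
    rows.foldl (fun st row =>
      (pvRowKeys row).foldl (fun st key =>
        if !(PySem.Set.contains st.1 key) && !(DEFAULT_PRIORITY_FIELDS.contains key) then
          (PySem.Set.add st.1 key, st.2 ++ [key])
        else st) st) (PySem.Set.empty, [])
  DEFAULT_PRIORITY_FIELDS ++ PySem.List.sorted st.2 (fun x => x) false

-- ===== PORT B =====
-- one scan step of Source B's dedup loop: 'extras[-1]' is pyGet? extras (-1), guarded by 'not extras'
def pvScanStep (extras : List String) (k : String) : List String :=
  if !(DEFAULT_PRIORITY_FIELDS.contains k) &&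
     (decide (extras = []) || decide (PySem.List.pyGet? extras (-1) ≠ some k)) then
    extras ++ [k]
  else extras

def build_fieldnames_alt (rows : List (List (String × String))) : List String :=
  let allKeys : List String := rows.foldl (fun acc row => acc ++ pvRowKeys row) []
  let s : List String := PySem.List.sorted allKeys (fun x => x) false
  let extras : List String := s.foldl pvScanStep []
  DEFAULT_PRIORITY_FIELDS ++ extras

-- ===== PRECONDITION & SPEC =====
def Spec_build_fieldnames (rows : List (List (String × String))) (out : List String) : Prop := out = build_fieldnames_alt rows
instance (rows : List (List (String × String))) (out : List String) : Decidable (Spec_build_fieldnames rows out) := by unfold Spec_build_fieldnames; infer_instance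

-- ===== CLAIM (what is proved, stated in full; the proofs are below) =====
def Claim_equal_build_fieldnames : Prop := ∀ (rows : List (List (String × String))), Dom_build_fieldnames rows → Spec_build_fieldnames rows (build_fieldnames rows)

-- ===== LEMMAS AND PROOFS =====

-- pyGet? at -1 on a nonempty list is getLast?
theorem pv_pyGet_neg_one (acc : List String) (hne : acc ≠ []) :
    PySem.List.pyGet? acc (-1) = acc.getLast? := by
  have h1 : 1 ≤ acc.length := by
    cases acc with
    | nil => exact absurd rfl hne
    | cons a l => simp
  simp [PySem.List.pyGet?, PySem.List.pyIdx?, h1, List.getLast?_eq_getElem?]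

-- every element of a strictly increasing list is ≤ its last element
theorem pv_le_getLast {acc : List String} {m : String}
    (hp : acc.Pairwise (· < ·)) (hm : acc.getLast? = some m) :
    ∀ a ∈ acc, a ≤ m := by
  induction acc with
  | nil => simp at hm
  | cons x xs ih =>
    intro a ha
    cases xs with
    | nil => simp_all
    | cons y ys =>
      have hm' : (y :: ys).getLast? = some m := by
        simpa [List.getLast?_cons_cons] using hm
      have hym : ∀ a ∈ y :: ys, a ≤ m := ih (List.Pairwise.of_cons hp) hm'
      rcases List.mem_cons.mp ha with rfl | h
      · have hxy : a < y := (List.pairwise_cons.mp hp).1 y (by simp)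
        exact le_of_lt (lt_of_lt_of_le hxy (hym y (by simp)))
      · exact hym a h

-- invariant of Source B's scan over a ≤-sorted list
theorem pv_scan_inv (s : List String) (acc : List String)
    (hs : s.Pairwise (· ≤ ·)) (hacc : acc.Pairwise (· < ·))
    (hle : ∀ a ∈ acc, ∀ b ∈ s, a ≤ b) :
    (s.foldl pvScanStep acc).Pairwise (· < ·) ∧
    (∀ x, x ∈ s.foldl pvScanStep acc ↔ x ∈ acc ∨ (x ∈ s ∧ x ∉ DEFAULT_PRIORITY_FIELDS)) := by
  induction s generalizing acc with
  | nil => exact ⟨hacc, fun x => by simp⟩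
  | cons k rest ih =>
    have hrest : rest.Pairwise (· ≤ ·) := (List.pairwise_cons.mp hs).2
    have hklb : ∀ b ∈ rest, k ≤ b := (List.pairwise_cons.mp hs).1
    simp only [List.foldl_cons]
    by_cases hprio : k ∈ DEFAULT_PRIORITY_FIELDS
    · have hstep : pvScanStep acc k = acc := by
        simp [pvScanStep, hprio]
      rw [hstep]
      obtain ⟨h1, h2⟩ := ih acc hrest hacc (fun a ha b hb => hle a ha b (by simp [hb]))
      refine ⟨h1, fun x => ?_⟩
      rw [h2 x]
      constructor
      · rintro (h | ⟨h, hn⟩)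
        · exact Or.inl h
        · exact Or.inr ⟨by simp [h], hn⟩
      · rintro (h | ⟨h, hn⟩)
        · exact Or.inl h
        · rcases List.mem_cons.mp h with rfl | h
          · exact absurd hprio hn
          · exact Or.inr ⟨h, hn⟩
    · by_cases hlast : acc.getLast? = some k
      · -- duplicate of the last appended element: skipped, but k ∈ acc already
        have hkacc : k ∈ acc := List.mem_of_getLast? hlast
        have hne : acc ≠ [] := by rintro rfl; simp at hlast
        have hstep : pvScanStep acc k = acc := by
          simp [pvScanStep, hprio, hne, pv_pyGet_neg_one acc hne, hlast]
        rw [hstep]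
        obtain ⟨h1, h2⟩ := ih acc hrest hacc (fun a ha b hb => hle a ha b (by simp [hb]))
        refine ⟨h1, fun x => ?_⟩
        rw [h2 x]
        constructor
        · rintro (h | ⟨h, hn⟩)
          · exact Or.inl h
          · exact Or.inr ⟨by simp [h], hn⟩
        · rintro (h | ⟨h, hn⟩)
          · exact Or.inl h
          · rcases List.mem_cons.mp h with rfl | h
            · exact Or.inl hkacc
            · exact Or.inr ⟨h, hn⟩
      · -- new element: appended
        have hstep : pvScanStep acc k = acc ++ [k] := by
          rcases eq_or_ne acc [] with rfl | hne
          · simp [pvScanStep, hprio]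
          · simp [pvScanStep, hprio, hne, pv_pyGet_neg_one acc hne, hlast]
        rw [hstep]
        have hltk : ∀ a ∈ acc, a < k := by
          intro a ha
          have hne : acc ≠ [] := by rintro rfl; simp at ha
          cases hm : acc.getLast? with
          | none => exact absurd (List.getLast?_eq_none_iff.mp hm) hne
          | some m =>
            have ham : a ≤ m := pv_le_getLast hacc hm a ha
            have hmk : m ≤ k := hle m (List.mem_of_getLast? hm) k (by simp)
            have hmne : m ≠ k := fun h => hlast (h ▸ hm)
            exact lt_of_le_of_lt ham (lt_of_le_of_ne hmk hmne)
        have hacc' : (acc ++ [k]).Pairwise (· < ·) := by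
          rw [List.pairwise_append]
          exact ⟨hacc, by simp, by simpa using hltk⟩
        have hle' : ∀ a ∈ acc ++ [k], ∀ b ∈ rest, a ≤ b := by
          intro a ha b hb
          rcases List.mem_append.mp ha with h | h
          · exact hle a h b (by simp [hb])
          · simp at h; subst h; exact hklb b hb
        obtain ⟨h1, h2⟩ := ih (acc ++ [k]) hrest hacc' hle'
        refine ⟨h1, fun x => ?_⟩
        rw [h2 x]
        simp only [List.mem_append, List.mem_cons, List.not_mem_nil, or_false]
        constructor
        · rintro ((h | rfl) | ⟨h, hn⟩)
          · exact Or.inl h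
          · exact Or.inr ⟨Or.inl rfl, hprio⟩
          · exact Or.inr ⟨Or.inr h, hn⟩
        · rintro (h | ⟨(rfl | h), hn⟩)
          · exact Or.inl (Or.inl h)
          · exact Or.inl (Or.inr rfl)
          · exact Or.inr ⟨h, hn⟩

-- A's inner loop, started with seen = extra, keeps them equal and performs
-- Set.add over exactly the non-priority keys
theorem pv_inner (ks e : List String) :
    ks.foldl (fun (st : PySem.Set String × List String) key =>
        if !(PySem.Set.contains st.1 key) && !(DEFAULT_PRIORITY_FIELDS.contains key) then
          (PySem.Set.add st.1 key, st.2 ++ [key])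
        else st) (e, e)
      = (let g := (ks.filter (fun k => !(DEFAULT_PRIORITY_FIELDS.contains k))).foldl PySem.Set.add e
         (g, g)) := by
  induction ks generalizing e with
  | nil => rfl
  | cons k ks ih =>
    simp only [List.foldl_cons, List.filter_cons]
    by_cases hp : k ∈ DEFAULT_PRIORITY_FIELDS
    · rw [if_neg (by simp [hp]), if_neg (by simp [hp])]
      exact ih e
    · by_cases hc : k ∈ e
      · rw [if_neg (by simp [PySem.Set.contains, hc]), if_pos (by simp [hp])]
        simp only [List.foldl_cons]
        have hadd : PySem.Set.add e k = e := by simp [PySem.Set.add, PySem.Set.contains, hc]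
        rw [hadd]
        exact ih e
      · rw [if_pos (by simp [PySem.Set.contains, hc, hp]), if_pos (by simp [hp])]
        simp only [List.foldl_cons]
        have hadd : PySem.Set.add e k = e ++ [k] := by
          simp [PySem.Set.add, PySem.Set.contains, hc]
        rw [← hadd]
        exact ih (PySem.Set.add e k)

-- A's whole double loop: extra = set of non-priority keys, in first-occurrence order
theorem pv_outer (rows : List (List (String × String))) (e : List String) :
    rows.foldl (fun (st : PySem.Set String × List String) row =>
      (pvRowKeys row).foldl (fun st key =>
        if !(PySem.Set.contains st.1 key) && !(DEFAULT_PRIORITY_FIELDS.contains key) then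
          (PySem.Set.add st.1 key, st.2 ++ [key])
        else st) st) (e, e)
      = (let g := ((rows.flatMap (fun row => pvRowKeys row)).filter
                    (fun k => !(DEFAULT_PRIORITY_FIELDS.contains k))).foldl PySem.Set.add e
         (g, g)) := by
  induction rows generalizing e with
  | nil => rfl
  | cons row rows ih =>
    simp only [List.foldl_cons, List.flatMap_cons, List.filter_append, List.foldl_append]
    rw [pv_inner]
    exact ih _

theorem build_fieldnames_spec : Claim_equal_build_fieldnames := by
  intro rows _
  unfold Spec_build_fieldnames build_fieldnames build_fieldnames_alt
  simp only [PySem.Set.empty, pv_outer rows [], PySem.List.foldl_append_eq_flatMap,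
    List.nil_append]
  rw [← PySem.Set.ofList_eq_foldl]
  congr 1
  -- both equal the strictly increasing rearrangement of the non-priority keys
  have hs : (PySem.List.sorted (rows.flatMap fun row => pvRowKeys row) (fun x => x) false).Pairwise
      (· ≤ ·) := PySem.List.sorted_pairwise _ _
  obtain ⟨hlt, hmem⟩ := pv_scan_inv _ [] hs (by simp) (by simp)
  refine PySem.List.sorted_eq_of_perm_of_pairwise_lt _ _ _ ?_ hlt
  refine (List.perm_ext_iff_of_nodup (hlt.imp ne_of_lt) (PySem.Set.nodup_ofList _)).mpr ?_
  intro x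
  rw [hmem x, PySem.Set.mem_ofList, List.mem_filter, PySem.List.mem_sorted]
  simp
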